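-- pv_equiv track=rewrite | github.com/Michael-Amar-95/CellBioSimulation | Restriction_enzyme_analysis.py | find_srr
-- ===== SOURCE A (Python) =====
-- def find_srr(dna_seq):
--     """
--     :param dna_seq: the dna i get from the user
--     :return: All the srr that exist in the sequence.
--     """
--     n = len(dna_seq)
--     #Initialize an empty string
--     final_seq = ""
--     #This loop limit the length of the repeated sequence.
--     for i in range(1, 7):
--         #This loop look for the srr
--         for m in range(n - (3 * i) + 1):
--             #this is the seq i want to check if he repeated in the strain.
--             seq = dna_seq[m:m + i]
--             #This var help me to count how much the seq repeated it self.
--             flag = 0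
--             # I initialize the seq to be from the current index until the end of the strain.
--             temp_seq = dna_seq[m:n + 1]
--             # Count how much time it is repeated.
--             while temp_seq.startswith(seq) and flag * i < n:
--                 flag = flag + 1
--                 temp_seq = dna_seq[m + i * flag: n]
--             else:
--                 #if the seq repeat it self more than 3 times than i save him.
--                 if flag >= 3:
--                     final_seq += seq + "," + str(flag) + ";"
--     # if i have no srr i send None.
--     if final_seq is None:
--         return None
--     return final_seq[0: len(final_seq) - 1]
-- ===== SOURCE B (Python) =====
-- def find_srr(dna_seq):
--     """Backward DP per unit length: run[m] = 1 + run[m+i] when the block at m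
--     equals the block at m+i; O(n) per unit length instead of a rescan per start."""
--     n = len(dna_seq)
--     parts = []
--     for i in range(1, 7):
--         run = [0] * (n + 1)
--         for m in range(n - i, -1, -1):
--             if m + 2 * i <= n and dna_seq[m:m + i] == dna_seq[m + i:m + 2 * i]:
--                 run[m] = run[m + i] + 1
--             else:
--                 run[m] = 1
--         for m in range(n - 3 * i + 1):
--             if run[m] >= 3:
--                 parts.append(dna_seq[m:m + i] + "," + str(run[m]))
--     return ";".join(parts)
-- ===== Notes on version B (the rewrite author's own statement) =====
-- stated objective: faster
-- what changed: Replaces A's per-start while-loop rescan (recounting the repeats at every position) with a backward dynamic program per unit length (run[m] = run[m+i]+1 when the block at m equals the block at m+i) plus a single join of the collected parts.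
import Mathlib
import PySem

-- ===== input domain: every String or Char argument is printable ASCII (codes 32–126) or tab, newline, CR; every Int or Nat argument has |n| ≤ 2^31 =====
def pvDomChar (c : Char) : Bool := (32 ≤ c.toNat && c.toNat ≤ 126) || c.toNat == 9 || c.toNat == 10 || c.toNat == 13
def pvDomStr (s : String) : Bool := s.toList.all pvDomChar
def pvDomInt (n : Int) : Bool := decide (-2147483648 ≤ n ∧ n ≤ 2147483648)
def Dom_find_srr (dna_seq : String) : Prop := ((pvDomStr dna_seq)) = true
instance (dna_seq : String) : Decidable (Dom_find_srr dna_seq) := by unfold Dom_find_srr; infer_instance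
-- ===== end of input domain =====

-- B replaces A's per-position rescan (while-loop counting repeats at every start) by a
-- backward DP per unit length (run[m] = run[m+i]+1 when adjacent blocks agree): same output, asymptotically faster.

-- ===== PORT A =====
-- the while-loop of A, fuel-bounded (fuel n+2 always suffices: the loop stops once flag*i < n fails)
def findSrrWhileA (s : List Char) (n i m : Int) (seq : List Char) (flag : Int) (temp : List Char) : Nat → Int
  | 0 => flag
  | fuel + 1 =>
    if PySem.Chars.startswith temp seq && decide (flag * i < n) then
      findSrrWhileA s n i m seq (flag + 1) (PySem.List.slice s (some (m + i * (flag + 1))) (some n)) fuel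
    else flag

def find_srr (dna_seq : String) : String :=
  let s := dna_seq.toList
  let n : Int := (s.length : Int)
  let final : List Char := (PySem.List.pyRange 1 7 1).foldl (fun final i =>
    (PySem.List.pyRange 0 (n - 3 * i + 1) 1).foldl (fun final m =>
      let seq := PySem.List.slice s (some m) (some (m + i))
      let temp := PySem.List.slice s (some m) (some (n + 1))
      let flag := findSrrWhileA s n i m seq 0 temp (s.length + 2)
      if flag ≥ 3 then final ++ seq ++ [','] ++ PySem.Int.toChars flag ++ [';'] else final)
      final) []
  String.ofList (PySem.List.slice final (some 0) (some ((final.length : Int) - 1)))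

-- ===== PORT B =====
-- the backward fill of B's run array for one unit length i
def altRun (s : List Char) (n i : Int) : List Int :=
  (PySem.List.pyRange (n - i) (-1) (-1)).foldl (fun run m =>
    PySem.List.pySetD run m
      (if decide (m + 2 * i ≤ n) &&
          (PySem.List.slice s (some m) (some (m + i)) == PySem.List.slice s (some (m + i)) (some (m + 2 * i)))
       then PySem.List.pyGetD run (m + i) 0 + 1 else 1))
    (List.replicate (n.toNat + 1) 0)

def find_srr_alt (dna_seq : String) : String :=
  let s := dna_seq.toList
  let n : Int := (s.length : Int)
  let parts : List (List Char) := (PySem.List.pyRange 1 7 1).foldl (fun parts i =>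
    let run := altRun s n i
    (PySem.List.pyRange 0 (n - 3 * i + 1) 1).foldl (fun parts m =>
      if PySem.List.pyGetD run m 0 ≥ 3 then
        parts ++ [PySem.List.slice s (some m) (some (m + i)) ++ [','] ++ PySem.Int.toChars (PySem.List.pyGetD run m 0)]
      else parts) parts) []
  String.ofList (PySem.Chars.join [';'] parts)

-- ===== PRECONDITION & SPEC =====
def Spec_find_srr (dna_seq : String) (out : String) : Prop := out = find_srr_alt dna_seq
instance (dna_seq : String) (out : String) : Decidable (Spec_find_srr dna_seq out) := by unfold Spec_find_srr; infer_instance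

-- ===== CLAIM (what is proved, stated in full; the proofs are below) =====
def Claim_equal_find_srr : Prop := ∀ (dna_seq : String), Dom_find_srr dna_seq → Spec_find_srr dna_seq (find_srr dna_seq)

-- ===== LEMMAS AND PROOFS =====

-- the block of length i starting at m (the value of dna_seq[m:m+i] for 0 ≤ m)
def blockC (s : List Char) (i m : Nat) : List Char := (s.drop m).take i

-- specification count: number of consecutive copies of the block at m (0 if no full block fits)
def runF (s : List Char) (i m : Nat) : Nat :=
  if h : 0 < i ∧ m + i ≤ s.length then
    if m + 2 * i ≤ s.length ∧ blockC s i m = blockC s i (m + i) then runF s i (m + i) + 1 else 1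
  else 0
termination_by s.length - m
decreasing_by omega

-- number of consecutive copies of a fixed word u starting at position p
def cntC (s u : List Char) (p : Nat) : Nat :=
  if h : 0 < u.length ∧ u.isPrefixOf (s.drop p) then cntC s u (p + u.length) + 1 else 0
termination_by s.length - p
decreasing_by
  have h2 := (List.isPrefixOf_iff_prefix.mp h.2).length_le
  simp at h2
  omega

-- the reported piece at (i, m), if any
def itemF (s : List Char) (i m : Nat) : Option (List Char) :=
  if 3 ≤ runF s i m then some (blockC s i m ++ [','] ++ PySem.Int.toChars ((runF s i m : Nat) : Int)) else none

def semiJoin (ps : List (List Char)) : List Char := (ps.map (· ++ [';'])).flatten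

lemma semiJoin_nil : semiJoin [] = [] := rfl

lemma semiJoin_cons (a : List Char) (t : List (List Char)) :
    semiJoin (a :: t) = (a ++ [';']) ++ semiJoin t := by simp [semiJoin]

lemma semiJoin_append (a b : List (List Char)) :
    semiJoin (a ++ b) = semiJoin a ++ semiJoin b := by simp [semiJoin]

lemma block_len (s : List Char) (i m : Nat) (h : m + i ≤ s.length) : (blockC s i m).length = i := by
  simp [blockC]; omega

lemma prefix_iff_block (s u : List Char) (i p : Nat) (hu : u.length = i) (hi : 0 < i) :
    u.isPrefixOf (s.drop p) ↔ (p + i ≤ s.length ∧ blockC s i p = u) := by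
  rw [List.isPrefixOf_iff_prefix, List.prefix_iff_eq_take, hu]
  constructor
  · intro h
    have hl := congrArg List.length h
    simp at hl
    constructor
    · omega
    · simp [blockC, ← h]
  · rintro ⟨h1, h2⟩
    simp [blockC] at h2
    exact h2.symm

lemma slice_dropLast (xs : List Char) :
    PySem.List.slice xs (some 0) (some ((xs.length : Int) - 1)) = xs.dropLast := by
  cases xs with
  | nil => decide
  | cons a t =>
    have h : ((a :: t).length : Int) - 1 = (((a :: t).length - 1 : Nat) : Int) := by
      simp
    rw [h, PySem.List.slice_zero_start, PySem.List.slice_to_natCast, ← List.dropLast_eq_take]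

lemma semiJoin_dropLast (ps : List (List Char)) :
    (semiJoin ps).dropLast = PySem.Chars.join [';'] ps := by
  induction ps with
  | nil => rfl
  | cons a t ih =>
    cases t with
    | nil => simp [semiJoin, PySem.Chars.join_singleton]
    | cons b t2 =>
      have hne : semiJoin (b :: t2) ≠ [] := by simp [semiJoin]
      have : semiJoin (a :: b :: t2) = (a ++ [';']) ++ semiJoin (b :: t2) := by
        simp [semiJoin]
      rw [this, List.dropLast_append_of_ne_nil, ih, PySem.Chars.join_cons_cons]
      simp
      exact hne

lemma whileA_eq (s u : List Char) (i m : Int) (hi : 0 < i) (hm : 0 ≤ m)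
    (hiu : (u.length : Int) = i) :
    ∀ (fuel : Nat) (flag : Int) (p : Nat), 0 ≤ flag → (p : Int) = m + i * flag →
      s.length + 1 ≤ fuel + p →
      findSrrWhileA s (s.length : Int) i m u flag (s.drop p) fuel = flag + (cntC s u p : Int) := by
  intro fuel
  induction fuel with
  | zero =>
    intro flag p hf hp hfl
    have hcnt : cntC s u p = 0 := by
      rw [cntC, dif_neg]
      rintro ⟨h1, h2⟩
      rw [List.drop_eq_nil_of_le (by omega)] at h2
      have h3 := List.isPrefixOf_iff_prefix.mp h2
      simp [List.prefix_nil] at h3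
      simp [h3] at h1
    simp [findSrrWhileA, hcnt]
  | succ fuel ih =>
    intro flag p hf hp hfl
    by_cases hpre : u.isPrefixOf (s.drop p)
    · -- loop continues
      have hsw : PySem.Chars.startswith (s.drop p) u = true :=
        (PySem.Chars.startswith_iff _ _).mpr (List.isPrefixOf_iff_prefix.mp hpre)
      have hlen : p + u.length ≤ s.length := by
        have h2 := (List.isPrefixOf_iff_prefix.mp hpre).length_le
        simp at h2
        omega
      have hq : flag * i = (p : Int) - m := by rw [mul_comm]; omega
      have hlt : flag * i < (s.length : Int) := by
        rw [hq]
        omega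
      have hcond : (PySem.Chars.startswith (s.drop p) u && decide (flag * i < (s.length : Int))) = true := by
        simp [hsw, hlt]
      have hslice : PySem.List.slice s (some (m + i * (flag + 1))) (some ((s.length : Int))) =
          s.drop (p + u.length) := by
        have harg : m + i * (flag + 1) = ((p + u.length : Nat) : Int) := by
          push_cast
          rw [show i * (flag + 1) = i * flag + i from by ring]
          omega
        rw [harg, PySem.List.slice_natCast]
        apply List.take_of_length_le
        simp
      have hrec := ih (flag + 1) (p + u.length) (by omega)
        (by push_cast; rw [show i * (flag + 1) = i * flag + i from by ring]; omega)
        (by omega)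
      have hcnt : cntC s u p = cntC s u (p + u.length) + 1 := by
        rw [cntC, dif_pos ⟨by omega, hpre⟩]
      rw [findSrrWhileA, if_pos hcond, hslice, hrec, hcnt]
      push_cast
      ring
    · -- loop stops
      have hsw : PySem.Chars.startswith (s.drop p) u = false := by
        rcases h : PySem.Chars.startswith (s.drop p) u with _ | _
        · rfl
        · exact absurd (List.isPrefixOf_iff_prefix.mpr ((PySem.Chars.startswith_iff _ _).mp h)) hpre
      have hcnt : cntC s u p = 0 := by
        rw [cntC, dif_neg]
        rintro ⟨h1, h2⟩
        exact hpre h2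
      rw [findSrrWhileA]
      simp [hsw, hcnt]

lemma cnt_eq_runF (s : List Char) : ∀ (d i m : Nat), s.length - m ≤ d → 0 < i → m + i ≤ s.length →
    cntC s (blockC s i m) m = runF s i m := by
  intro d
  induction d with
  | zero => intro i m hd hi hm; omega
  | succ d ih =>
    intro i m hd hi hm
    have hlen : (blockC s i m).length = i := block_len s i m hm
    have hpre1 : (blockC s i m).isPrefixOf (s.drop m) :=
      (prefix_iff_block s _ i m hlen hi).mpr ⟨hm, rfl⟩
    have hstep : cntC s (blockC s i m) m = cntC s (blockC s i m) (m + i) + 1 := by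
      rw [cntC, dif_pos ⟨by omega, hpre1⟩, hlen]
    by_cases hc : m + 2 * i ≤ s.length ∧ blockC s i m = blockC s i (m + i)
    · have hcnt2 : cntC s (blockC s i m) (m + i) = runF s i (m + i) := by
        rw [hc.2]
        exact ih i (m + i) (by omega) hi (by omega)
      conv_rhs => rw [runF, dif_pos ⟨hi, hm⟩, if_pos hc]
      omega
    · have hcnt2 : cntC s (blockC s i m) (m + i) = 0 := by
        rw [cntC, dif_neg]
        rintro ⟨h1, h2⟩
        have h3 := (prefix_iff_block s _ i (m + i) hlen hi).mp h2
        exact hc ⟨by omega, h3.2.symm⟩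
      conv_rhs => rw [runF, dif_pos ⟨hi, hm⟩, if_neg hc]
      omega

lemma runF_zero (s : List Char) (i k : Nat) (h : s.length < k + i) : runF s i k = 0 := by
  rw [runF, dif_neg]; omega

lemma altRunAux (s : List Char) (i : Int) (hi : 0 < i) :
    ∀ (b : Nat) (run : List Int), (b : Int) - 1 ≤ (s.length : Int) - i →
      run.length = s.length + 1 →
      (∀ k : Nat, (b : Int) - 1 < (k : Int) → k ≤ s.length → run.getD k 0 = (runF s i.toNat k : Int)) →
      ((PySem.List.pyRange ((b : Int) - 1) (-1) (-1)).foldl (fun run m =>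
        PySem.List.pySetD run m
          (if decide (m + 2 * i ≤ (s.length : Int)) &&
              (PySem.List.slice s (some m) (some (m + i)) == PySem.List.slice s (some (m + i)) (some (m + 2 * i)))
           then PySem.List.pyGetD run (m + i) 0 + 1 else 1)) run).length = s.length + 1 ∧
      ∀ k : Nat, k ≤ s.length →
        ((PySem.List.pyRange ((b : Int) - 1) (-1) (-1)).foldl (fun run m =>
          PySem.List.pySetD run m
            (if decide (m + 2 * i ≤ (s.length : Int)) &&
                (PySem.List.slice s (some m) (some (m + i)) == PySem.List.slice s (some (m + i)) (some (m + 2 * i)))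
             then PySem.List.pyGetD run (m + i) 0 + 1 else 1)) run).getD k 0 = (runF s i.toNat k : Int) := by
  intro b
  induction b with
  | zero =>
    intro run hb hlen hinv
    rw [PySem.List.pyRange_neg_one_eq_nil (by omega)]
    exact ⟨hlen, fun k hk => hinv k (by omega) hk⟩
  | succ b ih =>
    intro run hb hlen hinv
    obtain ⟨iN, rfl⟩ : ∃ iN : Nat, i = (iN : Int) := ⟨i.toNat, (Int.toNat_of_nonneg (by omega)).symm⟩
    have hiN : 0 < iN := by exact_mod_cast hi
    have hbb : ((b : Int) + 1) - 1 = (b : Int) := by ring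
    rw [show ((b + 1 : Nat) : Int) - 1 = (b : Int) by push_cast; ring,
        PySem.List.pyRange_neg_one_cons (by omega)]
    simp only [List.foldl_cons]
    -- the written value equals runF s iN b
    have hble : b + iN ≤ s.length := by omega
    have hs1 : PySem.List.slice s (some ((b : Int))) (some ((b : Int) + (iN : Int))) = blockC s iN b :=
      PySem.List.slice_natCast_add s b iN
    have hs2 : PySem.List.slice s (some ((b : Int) + (iN : Int))) (some ((b : Int) + 2 * (iN : Int))) = blockC s iN (b + iN) := by
      rw [show ((b : Int) + (iN : Int)) = ((b + iN : Nat) : Int) by push_cast; ring]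
      rw [show ((b : Int) + 2 * (iN : Int)) = ((b + iN : Nat) : Int) + ((iN : Nat) : Int) by push_cast; ring]
      exact PySem.List.slice_natCast_add s (b + iN) iN
    have hval : (if decide ((b : Int) + 2 * (iN : Int) ≤ (s.length : Int)) &&
          (PySem.List.slice s (some ((b:Int))) (some ((b:Int) + (iN:Int))) == PySem.List.slice s (some ((b:Int) + (iN:Int))) (some ((b:Int) + 2 * (iN:Int))))
        then PySem.List.pyGetD run ((b:Int) + (iN:Int)) 0 + 1 else 1) = ((runF s iN b : Nat) : Int) := by
      rw [hs1, hs2]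
      by_cases hc : b + 2 * iN ≤ s.length ∧ blockC s iN b = blockC s iN (b + iN)
      · have hdec : decide ((b : Int) + 2 * (iN : Int) ≤ (s.length : Int)) = true := by
          simp only [decide_eq_true_eq]; omega
        have hbeq : (blockC s iN b == blockC s iN (b + iN)) = true := by
          simp [hc.2]
        rw [hdec, hbeq]
        simp only [Bool.and_self, if_pos]
        have hget : PySem.List.pyGetD run ((b:Int) + (iN:Int)) 0 = (runF s iN (b + iN) : Int) := by
          rw [show ((b : Int) + (iN : Int)) = ((b + iN : Nat) : Int) by push_cast; ring,
              PySem.List.pyGetD_natCast]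
          exact hinv (b + iN) (by omega) (by omega)
        rw [hget]
        conv_rhs => rw [runF, dif_pos ⟨hiN, hble⟩, if_pos hc]
        push_cast
        ring
      · have : ¬ (decide ((b : Int) + 2 * (iN : Int) ≤ (s.length : Int)) &&
            (blockC s iN b == blockC s iN (b + iN))) = true := by
          simp only [Bool.and_eq_true, decide_eq_true_eq, beq_iff_eq]
          rintro ⟨h1, h2⟩
          exact hc ⟨by exact_mod_cast h1, h2⟩
        rw [if_neg this]
        conv_rhs => rw [runF, dif_pos ⟨hiN, hble⟩, if_neg hc]
        simp
    simp only [hval]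
    refine ih _ (by omega) ?_ ?_
    · simp [hlen]
    · intro k hk1 hk2
      by_cases hkb : k = b
      · subst hkb
        rw [PySem.List.pySetD_natCast]
        have hklt : k < run.length := by omega
        simp [List.getD_eq_getElem?_getD, List.getElem?_set_self hklt]
      · have hkgt : b < k := by omega
        rw [PySem.List.pySetD_natCast]
        rw [List.getD_eq_getElem?_getD, List.getElem?_set_ne (by omega), ← List.getD_eq_getElem?_getD]
        exact hinv k (by omega) hk2

lemma altRun_getD (s : List Char) (i : Int) (hi : 0 < i) (m : Nat) (hm : m ≤ s.length) :
    (altRun s (s.length : Int) i).getD m 0 = (runF s i.toNat m : Int) := by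
  unfold altRun
  rw [show ((s.length : Int)).toNat = s.length by simp]
  by_cases hni : -1 ≤ (s.length : Int) - i
  · have hb : ((((s.length : Int) - i + 1).toNat : Int)) - 1 = (s.length : Int) - i := by omega
    have h := altRunAux s i hi ((s.length : Int) - i + 1).toNat (List.replicate (s.length + 1) 0)
      (by omega) (by simp)
      (by
        intro k hk1 hk2
        rw [List.getD_replicate (0:Int) (by omega : k < s.length + 1), runF_zero]
        · simp
        · omega)
    rw [hb] at h
    exact h.2 m hm
  · rw [PySem.List.pyRange_neg_one_eq_nil (by omega)]
    simp only [List.foldl_nil]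
    rw [List.getD_replicate (0:Int) (by omega : m < s.length + 1), runF_zero]
    · simp
    · omega

lemma innerA (s : List Char) (i : Int) (hi : 1 ≤ i) :
    ∀ (l : List Int) (acc : List Char), (∀ m ∈ l, 0 ≤ m ∧ m + 3 * i ≤ (s.length : Int)) →
      l.foldl (fun final m =>
        let seq := PySem.List.slice s (some m) (some (m + i))
        let temp := PySem.List.slice s (some m) (some ((s.length : Int) + 1))
        let flag := findSrrWhileA s (s.length : Int) i m seq 0 temp (s.length + 2)
        if flag ≥ 3 then final ++ seq ++ [','] ++ PySem.Int.toChars flag ++ [';'] else final) acc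
      = acc ++ semiJoin (l.filterMap (fun m => itemF s i.toNat m.toNat)) := by
  obtain ⟨iN, rfl⟩ : ∃ iN : Nat, i = (iN : Int) := ⟨i.toNat, (Int.toNat_of_nonneg (by omega)).symm⟩
  have hiN : 0 < iN := by exact_mod_cast hi
  intro l
  induction l with
  | nil => intro acc _; simp [semiJoin_nil]
  | cons m l ih =>
    intro acc hmem
    obtain ⟨h0, h3⟩ := hmem m List.mem_cons_self
    obtain ⟨mN, rfl⟩ : ∃ mN : Nat, m = (mN : Int) := ⟨m.toNat, (Int.toNat_of_nonneg h0).symm⟩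
    have h3' : mN + 3 * iN ≤ s.length := by exact_mod_cast h3
    have hmi : mN + iN ≤ s.length := by omega
    have hseq : PySem.List.slice s (some ((mN : Int))) (some ((mN : Int) + (iN : Int))) = blockC s iN mN :=
      PySem.List.slice_natCast_add s mN iN
    have htemp : PySem.List.slice s (some ((mN : Int))) (some ((s.length : Int) + 1)) = s.drop mN := by
      rw [show ((s.length : Int) + 1) = ((s.length + 1 : Nat) : Int) by push_cast; ring,
          PySem.List.slice_natCast]
      apply List.take_of_length_le
      simp
      omega
    have hflag : findSrrWhileA s (s.length : Int) ((iN : Int)) ((mN : Int)) (blockC s iN mN) 0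
        (s.drop mN) (s.length + 2) = ((runF s iN mN : Nat) : Int) := by
      rw [whileA_eq s (blockC s iN mN) ((iN : Int)) ((mN : Int)) (by exact_mod_cast hiN)
            (by exact_mod_cast Nat.zero_le mN) (by rw [block_len s iN mN hmi])
            (s.length + 2) 0 mN le_rfl (by ring) (by omega),
          cnt_eq_runF s s.length iN mN (by omega) hiN hmi]
      simp
    simp only [List.foldl_cons, List.filterMap_cons, Int.toNat_natCast]
    rw [hseq, htemp, hflag]
    by_cases hr : 3 ≤ runF s iN mN
    · rw [if_pos (by exact_mod_cast hr : ((runF s iN mN : Nat) : Int) ≥ 3)]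
      rw [show itemF s iN mN = some (blockC s iN mN ++ [','] ++ PySem.Int.toChars ((runF s iN mN : Nat) : Int))
            from by rw [itemF, if_pos hr]]
      rw [ih _ (fun m hm => hmem m (List.mem_cons_of_mem _ hm)), semiJoin_cons]
      simp [List.append_assoc]
    · rw [if_neg (by exact_mod_cast hr : ¬ ((runF s iN mN : Nat) : Int) ≥ 3)]
      rw [show itemF s iN mN = none from by rw [itemF, if_neg hr]]
      exact ih _ (fun m hm => hmem m (List.mem_cons_of_mem _ hm))

lemma innerB (s : List Char) (i : Int) (hi : 1 ≤ i) :
    ∀ (l : List Int) (parts : List (List Char)), (∀ m ∈ l, 0 ≤ m ∧ m + 3 * i ≤ (s.length : Int)) →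
      l.foldl (fun parts m =>
        if PySem.List.pyGetD (altRun s (s.length : Int) i) m 0 ≥ 3 then
          parts ++ [PySem.List.slice s (some m) (some (m + i)) ++ [','] ++
            PySem.Int.toChars (PySem.List.pyGetD (altRun s (s.length : Int) i) m 0)]
        else parts) parts
      = parts ++ l.filterMap (fun m => itemF s i.toNat m.toNat) := by
  obtain ⟨iN, rfl⟩ : ∃ iN : Nat, i = (iN : Int) := ⟨i.toNat, (Int.toNat_of_nonneg (by omega)).symm⟩
  have hiN : 0 < iN := by exact_mod_cast hi
  intro l
  induction l with
  | nil => intro parts _; simp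
  | cons m l ih =>
    intro parts hmem
    obtain ⟨h0, h3⟩ := hmem m List.mem_cons_self
    obtain ⟨mN, rfl⟩ : ∃ mN : Nat, m = (mN : Int) := ⟨m.toNat, (Int.toNat_of_nonneg h0).symm⟩
    have h3' : mN + 3 * iN ≤ s.length := by exact_mod_cast h3
    have hget : PySem.List.pyGetD (altRun s (s.length : Int) ((iN : Int))) ((mN : Int)) 0
        = ((runF s iN mN : Nat) : Int) := by
      rw [PySem.List.pyGetD_natCast, altRun_getD s ((iN : Int)) (by exact_mod_cast hiN) mN (by omega)]
      simp
    have hseq : PySem.List.slice s (some ((mN : Int))) (some ((mN : Int) + (iN : Int))) = blockC s iN mN :=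
      PySem.List.slice_natCast_add s mN iN
    simp only [List.foldl_cons, List.filterMap_cons, Int.toNat_natCast]
    rw [hget, hseq]
    by_cases hr : 3 ≤ runF s iN mN
    · rw [if_pos (by exact_mod_cast hr : ((runF s iN mN : Nat) : Int) ≥ 3)]
      rw [show itemF s iN mN = some (blockC s iN mN ++ [','] ++ PySem.Int.toChars ((runF s iN mN : Nat) : Int))
            from by rw [itemF, if_pos hr]]
      rw [ih _ (fun m hm => hmem m (List.mem_cons_of_mem _ hm))]
      simp [List.append_assoc]
    · rw [if_neg (by exact_mod_cast hr : ¬ ((runF s iN mN : Nat) : Int) ≥ 3)]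
      rw [show itemF s iN mN = none from by rw [itemF, if_neg hr]]
      exact ih _ (fun m hm => hmem m (List.mem_cons_of_mem _ hm))

lemma outer_eq (s : List Char) : ∀ (l : List Int) (acc : List Char) (parts : List (List Char)),
    (∀ i ∈ l, 1 ≤ i) → acc = semiJoin parts →
    l.foldl (fun final i =>
      (PySem.List.pyRange 0 ((s.length : Int) - 3 * i + 1) 1).foldl (fun final m =>
        let seq := PySem.List.slice s (some m) (some (m + i))
        let temp := PySem.List.slice s (some m) (some ((s.length : Int) + 1))
        let flag := findSrrWhileA s (s.length : Int) i m seq 0 temp (s.length + 2)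
        if flag ≥ 3 then final ++ seq ++ [','] ++ PySem.Int.toChars flag ++ [';'] else final) final) acc
    = semiJoin (l.foldl (fun parts i =>
        (PySem.List.pyRange 0 ((s.length : Int) - 3 * i + 1) 1).foldl (fun parts m =>
          if PySem.List.pyGetD (altRun s (s.length : Int) i) m 0 ≥ 3 then
            parts ++ [PySem.List.slice s (some m) (some (m + i)) ++ [','] ++
              PySem.Int.toChars (PySem.List.pyGetD (altRun s (s.length : Int) i) m 0)]
          else parts) parts) parts) := by
  intro l
  induction l with
  | nil => intro acc parts _ hacc; exact hacc
  | cons i l ih =>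
    intro acc parts hmem hacc
    have hi : 1 ≤ i := hmem i List.mem_cons_self
    have hbound : ∀ m ∈ PySem.List.pyRange 0 ((s.length : Int) - 3 * i + 1) 1,
        0 ≤ m ∧ m + 3 * i ≤ (s.length : Int) := by
      intro m hm
      rw [PySem.List.mem_pyRange_one] at hm
      omega
    simp only [List.foldl_cons]
    rw [innerA s i hi _ _ hbound, innerB s i hi _ _ hbound]
    exact ih _ _ (fun j hj => hmem j (List.mem_cons_of_mem _ hj))
      (by rw [hacc, semiJoin_append])

-- ===== VERDICT (by name: the statement is the Claim_ definition above) =====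
theorem find_srr_spec : Claim_equal_find_srr := by
  unfold Claim_equal_find_srr
  intro dna_seq _
  unfold Spec_find_srr
  simp only [find_srr, find_srr_alt]
  have hmem : ∀ i ∈ PySem.List.pyRange 1 7 1, (1 : Int) ≤ i := by
    intro i hi
    rw [PySem.List.mem_pyRange_one] at hi
    omega
  rw [outer_eq dna_seq.toList (PySem.List.pyRange 1 7 1) [] [] hmem rfl,
      slice_dropLast, semiJoin_dropLast]
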